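-- pv_equiv track=rewrite | github.com/pypi-data/pypi-mirror-233 | packages/elma-verifier/elma_verifier-0.0.6.tar.gz/elma_verifier-0.0.6/src/elma_verifier/verifier.py | validate_org_number
-- ===== SOURCE A (Python) =====
-- def validate_org_number(org_number):
--     """
--     Validates the format and structure of an organization number using the modulus 11 algorithm.
--     """
--
--     # Check the format of the organization number
--     if not isinstance(org_number, str) or not org_number.isdigit() or len(org_number) != 9:
--         return False
--
--     # Convert the organization number string to a list of individual digits
--     digits = [int(x) for x in org_number]
--
--     # Define the weights for the modulus 11 algorithm
--     weights = [3,2,7,6,5,4,3,2]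
--
--     # Compute the sum of products of the digits and the weights
--     product_sum = sum(digit * weight for digit, weight in zip(digits[:-1], weights))
--
--     # Calculate the remainder when dividing by 11
--     remainder = product_sum % 11
--
--     # Determine the control digit based on the remainder
--     if remainder == 0:
--         control_digit = 0
--     elif remainder == 1:
--         # The control digit cannot be a minus sign
--         return False
--     else:
--         control_digit = 11 - remainder
--
--     # Return True if the calculated control digit matches the last digit of the organization number
--     return control_digit == digits[-1]
-- ===== SOURCE B (Python) =====
-- def validate_org_number(org_number):
--     """Validate an organization number via a single modulus-11 divisibility test."""
--     if not isinstance(org_number, str) or not org_number.isdigit() or len(org_number) != 9: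
--         return False
--     weights = (3, 2, 7, 6, 5, 4, 3, 2, 1)
--     total = sum(int(c) * w for c, w in zip(org_number, weights))
--     return total % 11 == 0
-- ===== Notes on version B (the rewrite author's own statement) =====
-- stated objective: simpler
-- what changed: Replaces A's slice/zip weighted sum, remainder case analysis and control-digit derivation with a single weighted sum over all nine digits (weights 3,2,7,6,5,4,3,2,1) and one divisibility test total % 11 == 0; the remainder==1 early return disappears because no digit can then make the total divisible by 11.
import Mathlib
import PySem

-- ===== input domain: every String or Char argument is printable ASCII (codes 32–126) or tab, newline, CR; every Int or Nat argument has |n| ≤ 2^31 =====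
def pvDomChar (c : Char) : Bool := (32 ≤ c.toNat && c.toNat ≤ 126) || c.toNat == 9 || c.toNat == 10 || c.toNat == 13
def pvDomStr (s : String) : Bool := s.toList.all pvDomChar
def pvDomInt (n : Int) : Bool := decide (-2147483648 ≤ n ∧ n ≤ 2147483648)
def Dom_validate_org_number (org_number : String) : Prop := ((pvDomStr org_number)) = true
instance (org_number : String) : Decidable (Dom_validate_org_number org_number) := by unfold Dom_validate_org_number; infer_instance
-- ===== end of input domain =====

-- B replaces A's remainder case analysis and control-digit derivation with one
-- weighted-sum divisibility test (objective: simpler).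

-- int(x) for a single digit character x, ported by hand as c.toNat - 48;
-- exact since both programs reach it only under the isdigit guard ('0' ≤ c ≤ '9').
def pyDigit (c : Char) : Int := (c.toNat : Int) - 48

-- ===== PORT A =====
def validate_org_number (org_number : String) : Bool :=
  if !(PySem.Str.strIsdigit org_number) || org_number.toList.length ≠ 9 then false
  else
    let digits : List Int := org_number.toList.map pyDigit
    let weights : List Int := [3, 2, 7, 6, 5, 4, 3, 2]
    let product_sum : Int :=
      (List.zipWith (· * ·) (PySem.List.slice digits none (some (-1))) weights).sum
    let remainder : Int := PySem.Int.mod product_sum 11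
    if remainder = 0 then
      -- digits[-1]: in range under the length-9 guard, so getD 0 never fires
      decide ((0 : Int) = (PySem.List.pyGet? digits (-1)).getD 0)
    else if remainder = 1 then false
    else decide (11 - remainder = (PySem.List.pyGet? digits (-1)).getD 0)

-- ===== PORT B =====
def validate_org_number_alt (org_number : String) : Bool :=
  if !(PySem.Str.strIsdigit org_number) || org_number.toList.length ≠ 9 then false
  else
    let total : Int :=
      (List.zipWith (fun c w => pyDigit c * w) org_number.toList
        [3, 2, 7, 6, 5, 4, 3, 2, 1]).sum
    decide (PySem.Int.mod total 11 = 0)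

-- ===== PRECONDITION & SPEC =====
def Spec_validate_org_number (org_number : String) (out : Bool) : Prop := out = validate_org_number_alt org_number
instance (org_number : String) (out : Bool) : Decidable (Spec_validate_org_number org_number out) := by unfold Spec_validate_org_number; infer_instance

-- ===== CLAIM (what is proved, stated in full; the proofs are below) =====
def Claim_equal_validate_org_number : Prop := ∀ (org_number : String), Dom_validate_org_number org_number → Spec_validate_org_number org_number (validate_org_number org_number)

-- ===== LEMMAS AND PROOFS =====

theorem fmod_eleven (a : Int) : PySem.Int.mod a 11 = a % 11 := by
  show Int.fmod a 11 = a % 11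
  rw [Int.fmod_eq_emod]
  simp

theorem digit_bounds {c : Char} (h : PySem.Chars.isdigit c = true) :
    0 ≤ pyDigit c ∧ pyDigit c ≤ 9 := by
  simp only [PySem.Chars.isdigit, Bool.and_eq_true, decide_eq_true_eq, Char.le_def,
    UInt32.le_iff_toNat_le] at h
  have h1 : ('0' : Char).val.toNat = 48 := by decide
  have h2 : ('9' : Char).val.toNat = 57 := by decide
  rw [h1] at h; rw [h2] at h
  have hc : c.toNat = c.val.toNat := rfl
  unfold pyDigit
  omega

-- the two branch bodies agree on any 9-character digit string
theorem body_eq (l : List Char) (hl : l.length = 9)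
    (hall : ∀ c ∈ l, PySem.Chars.isdigit c = true) :
    (let digits : List Int := l.map pyDigit
     let weights : List Int := [3, 2, 7, 6, 5, 4, 3, 2]
     let product_sum : Int :=
       (List.zipWith (· * ·) (PySem.List.slice digits none (some (-1))) weights).sum
     let remainder : Int := PySem.Int.mod product_sum 11
     if remainder = 0 then
       decide ((0 : Int) = (PySem.List.pyGet? digits (-1)).getD 0)
     else if remainder = 1 then false
     else decide (11 - remainder = (PySem.List.pyGet? digits (-1)).getD 0))
    = (let total : Int :=
         (List.zipWith (fun c w => pyDigit c * w) l [3, 2, 7, 6, 5, 4, 3, 2, 1]).sum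
       decide (PySem.Int.mod total 11 = 0)) := by
  match l, hl with
  | [c1, c2, c3, c4, c5, c6, c7, c8, c9], _ =>
    obtain ⟨e1, f1⟩ := digit_bounds (hall c1 (by simp))
    obtain ⟨e2, f2⟩ := digit_bounds (hall c2 (by simp))
    obtain ⟨e3, f3⟩ := digit_bounds (hall c3 (by simp))
    obtain ⟨e4, f4⟩ := digit_bounds (hall c4 (by simp))
    obtain ⟨e5, f5⟩ := digit_bounds (hall c5 (by simp))
    obtain ⟨e6, f6⟩ := digit_bounds (hall c6 (by simp))
    obtain ⟨e7, f7⟩ := digit_bounds (hall c7 (by simp))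
    obtain ⟨e8, f8⟩ := digit_bounds (hall c8 (by simp))
    obtain ⟨e9, f9⟩ := digit_bounds (hall c9 (by simp))
    simp only [List.map_cons, List.map_nil]
    norm_num [PySem.List.slice, PySem.List.pyGet?, PySem.List.pyIdx?, PySem.List.clampIdx,
      fmod_eleven, (show ((8 : Int).toNat) = 8 from rfl), List.take_succ_cons, List.take_zero, List.zipWith,
      List.sum_cons, List.sum_nil]
    split_ifs with g1
    · simp only [decide_eq_decide]; omega
    · rw [Bool.eq_iff_iff]
      simp only [Bool.and_eq_true, Bool.not_eq_true', decide_eq_false_iff_not,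
        decide_eq_true_eq]
      omega

-- ===== VERDICT (by name: the statement is the Claim_ definition above) =====
theorem validate_org_number_spec : Claim_equal_validate_org_number := by
  intro s _
  unfold Spec_validate_org_number validate_org_number validate_org_number_alt
  by_cases hg : (!PySem.Str.strIsdigit s || decide (s.toList.length ≠ 9)) = true
  · rw [if_pos hg, if_pos hg]
  · rw [if_neg hg, if_neg hg]
    have hg' : (!PySem.Str.strIsdigit s || decide (s.toList.length ≠ 9)) = false := by
      cases h : (!PySem.Str.strIsdigit s || decide (s.toList.length ≠ 9)) with
      | false => rfl
      | true => exact absurd h hg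
    rw [Bool.or_eq_false_iff] at hg'
    have hdig : PySem.Str.strIsdigit s = true := by
      have := hg'.1; simpa using this
    have hlen : s.toList.length = 9 := by
      have := hg'.2; simpa using this
    have hall : ∀ c ∈ s.toList, PySem.Chars.isdigit c = true := by
      have h2 := hdig
      simp only [PySem.Str.strIsdigit, PySem.Chars.strIsdigit, Bool.and_eq_true,
        List.all_eq_true] at h2
      exact h2.2
    exact body_eq s.toList hlen hall
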